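-- pv_equiv track=rewrite | github.com/MelnychenkoM/xyz2atoms | xyz2atoms/.ipynb_checkpoints/molecule-checkpoint.py | _traverse_cycle
-- ===== SOURCE A (Python) =====
-- def _traverse_cycle(graph, start_node, direction='forward', start_index=0):
--
--     visited = set()
--     stack = [start_node]
--     index = start_index - 1
--     atom_names = {}
--
--     while stack:
--         current_node = stack.pop()
--         if current_node not in visited:
--             visited.add(current_node)
--             index += 1
--
--             neighbors = [neighbor for neighbor in graph[current_node] if neighbor in graph]
--
--             if current_node.startswith('N'):
--                 atom_names[current_node] = f"N{index}"
--             elif current_node.startswith('C'):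
--                 atom_names[current_node] = f"C{index}"
--
--             if direction == 'forward':
--                 neighbors = neighbors[::-1]
--             for neighbor in neighbors:
--                 if neighbor not in visited:
--                     stack.append(neighbor)
--     return atom_names
-- ===== SOURCE B (Python) =====
-- def _traverse_cycle(graph, start_node, direction='forward', start_index=0):
--     # pass 1: compute the DFS visit order as a list
--     seen = set()
--     order = []
--     def visit(node):
--         if node in seen:
--             return
--         seen.add(node)
--         order.append(node)
--         nbrs = [n for n in graph[node] if n in graph]
--         for n in (nbrs if direction == 'forward' else nbrs[::-1]):
--             visit(n)
--     visit(start_node)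
--     # pass 2: assign names along the order
--     atom_names = {}
--     i = start_index
--     for node in order:
--         if node.startswith('N'):
--             atom_names[node] = f"N{i}"
--         elif node.startswith('C'):
--             atom_names[node] = f"C{i}"
--         i += 1
--     return atom_names
-- ===== Notes on version B (the rewrite author's own statement) =====
-- stated objective: alternative
-- what changed: Splits the work into two passes: a recursive dfs that only computes the visit-order list, then a separate indexed loop over that list that builds atom_names, instead of A's single while-stack loop that interleaves traversal, index bookkeeping and dict insertion.
import Mathlib
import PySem

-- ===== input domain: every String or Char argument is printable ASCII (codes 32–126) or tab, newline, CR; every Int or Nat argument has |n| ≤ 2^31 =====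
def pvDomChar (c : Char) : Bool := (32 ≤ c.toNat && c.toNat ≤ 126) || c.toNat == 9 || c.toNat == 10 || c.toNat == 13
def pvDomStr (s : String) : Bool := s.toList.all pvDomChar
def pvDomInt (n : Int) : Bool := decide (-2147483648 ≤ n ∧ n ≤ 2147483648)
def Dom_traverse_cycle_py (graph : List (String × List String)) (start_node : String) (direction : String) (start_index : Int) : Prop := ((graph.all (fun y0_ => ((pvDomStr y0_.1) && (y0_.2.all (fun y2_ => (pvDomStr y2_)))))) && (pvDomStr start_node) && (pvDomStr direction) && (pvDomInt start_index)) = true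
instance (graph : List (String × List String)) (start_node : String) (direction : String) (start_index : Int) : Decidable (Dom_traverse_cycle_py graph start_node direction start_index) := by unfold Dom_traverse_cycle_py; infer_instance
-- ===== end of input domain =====

-- B splits A's single stack loop into two passes: a recursive dfs computing only the
-- visit-order list, then a separate indexed loop over that list building atom_names
-- (same return value; objective: alternative decomposition, no speed claim).

-- ===== PORT A =====
-- neighbors = [neighbor for neighbor in graph[current_node] if neighbor in graph]
-- (graph[current_node] on a key not in the dict is a Python KeyError: such calls are
--  excluded by Pre_; the [] default below is never reached under Pre_)
def pvNbrsA (graph : List (String × List String)) (n : String) : List String :=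
  match (PySem.Dict.mk graph).get? n with
  | some ns => ns.filter (fun nb => (PySem.Dict.mk graph).contains nb)
  | none => []

-- the while-stack loop; the stack is stored top-first, so Python's append/pop at the RIGHT
-- end become cons/uncons here (same sequence of pushed and popped elements).
-- fuel counts productive visits; graph.length + 1 provably suffices, so the 0-branch is
-- unreachable from traverse_cycle_py (proved in pv_main below).
def pvLoopA (graph : List (String × List String)) (direction : String) :
    Nat → PySem.Set String → List String → Int → PySem.Dict String String → PySem.Dict String String
  | _fuel, _visited, [], _index, names => names
  | fuel, visited, current :: rest, index, names =>
    if PySem.Set.contains visited current then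
      pvLoopA graph direction fuel visited rest index names
    else
      match fuel with
      | 0 => names
      | f + 1 =>
        pvLoopA graph direction f (PySem.Set.add visited current)
          -- push loop: for neighbor in neighbors (reversed first if forward):
          --   if neighbor not in visited: stack.append(neighbor)
          ((if direction == "forward" then (pvNbrsA graph current).reverse else pvNbrsA graph current).foldl
            (fun st nb => if PySem.Set.contains (PySem.Set.add visited current) nb then st else nb :: st)
            rest)
          (index + 1)
          (if PySem.Str.startswith current "N" then names.insert current ("N" ++ PySem.Int.toStr (index + 1))
           else if PySem.Str.startswith current "C" then names.insert current ("C" ++ PySem.Int.toStr (index + 1))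
           else names)
  termination_by fuel _ stack _ _ => (fuel, stack.length)

def traverse_cycle_py (graph : List (String × List String)) (start_node : String) (direction : String) (start_index : Int) : List (String × String) :=
  (pvLoopA graph direction (graph.length + 1) PySem.Set.empty [start_node] (start_index - 1) PySem.Dict.empty).items

-- ===== PORT B =====
-- nbrs = [n for n in graph[node] if n in graph]   (KeyError case excluded by Pre_)
def pvNbrsB (graph : List (String × List String)) (n : String) : List String :=
  match (PySem.Dict.mk graph).get? n with
  | some ns => ns.filter (fun nb => (PySem.Dict.mk graph).contains nb)
  | none => []

-- pass 1: the inner visit(node), carrying only (seen, order); order.append is ++ [node].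
-- fuel bounds the productive recursion depth; graph.length + 1 provably suffices.
def pvVisitB (graph : List (String × List String)) (direction : String) :
    Nat → PySem.Set String × List String → String → PySem.Set String × List String
  | 0, s, _node => s
  | f + 1, s, node =>
    if PySem.Set.contains s.1 node then s
    else
      (if direction == "forward" then pvNbrsB graph node else (pvNbrsB graph node).reverse).foldl
        (fun st nb => pvVisitB graph direction f st nb)
        (PySem.Set.add s.1 node, s.2 ++ [node])

-- pass 2: i = start_index; for node in order: maybe-insert; i += 1
def traverse_cycle_py_alt (graph : List (String × List String)) (start_node : String) (direction : String) (start_index : Int) : List (String × String) :=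
  (((pvVisitB graph direction (graph.length + 1) (PySem.Set.empty, []) start_node).2.foldl
      (fun (s : Int × PySem.Dict String String) node =>
        (s.1 + 1,
          if PySem.Str.startswith node "N" then s.2.insert node ("N" ++ PySem.Int.toStr s.1)
          else if PySem.Str.startswith node "C" then s.2.insert node ("C" ++ PySem.Int.toStr s.1)
          else s.2))
      (start_index, PySem.Dict.empty)).2).items

-- ===== PRECONDITION & SPEC =====
-- Pre_ excludes exactly the inputs where Python raises: graph[start_node] is a KeyError
-- when start_node is not a key of graph (every other looked-up node is filtered by 'in graph').
def Pre_traverse_cycle_py (graph : List (String × List String)) (start_node : String) (direction : String) (start_index : Int) : Prop :=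
  (PySem.Dict.mk graph).contains start_node = true
instance (graph : List (String × List String)) (start_node : String) (direction : String) (start_index : Int) : Decidable (Pre_traverse_cycle_py graph start_node direction start_index) := by unfold Pre_traverse_cycle_py; infer_instance

def pvWitness_traverse_cycle_py : (List (String × List String)) × String × String × Int :=
  ([("C1", ["N2"]), ("N2", ["C1"])], "C1", "forward", 0)

def Spec_traverse_cycle_py (graph : List (String × List String)) (start_node : String) (direction : String) (start_index : Int) (out : List (String × String)) : Prop := out = traverse_cycle_py_alt graph start_node direction start_index
instance (graph : List (String × List String)) (start_node : String) (direction : String) (start_index : Int) (out : List (String × String)) : Decidable (Spec_traverse_cycle_py graph start_node direction start_index out) := by unfold Spec_traverse_cycle_py; infer_instance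

-- ===== CLAIM (what is proved, stated in full; the proofs are below) =====
def Claim_equal_traverse_cycle_py : Prop := ∀ (graph : List (String × List String)) (start_node : String) (direction : String) (start_index : Int), Dom_traverse_cycle_py graph start_node direction start_index → Pre_traverse_cycle_py graph start_node direction start_index → Spec_traverse_cycle_py graph start_node direction start_index (traverse_cycle_py graph start_node direction start_index)

-- ===== LEMMAS AND PROOFS =====

-- proof-side bridge: the full-state dfs (visited, index, names) that A's loop unfolds to;
-- it is then coupled to B's two passes (pv_couple, pv_names_fold below).
def pvDfsAB (graph : List (String × List String)) (direction : String) :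
    Nat → PySem.Set String × Int × PySem.Dict String String → String →
    PySem.Set String × Int × PySem.Dict String String
  | 0, s, _node => s
  | f + 1, s, node =>
    if PySem.Set.contains s.1 node then s
    else
      (if direction == "forward" then pvNbrsB graph node else (pvNbrsB graph node).reverse).foldl
        (fun st nb => pvDfsAB graph direction f st nb)
        (PySem.Set.add s.1 node, s.2.1 + 1,
          if PySem.Str.startswith node "N" then s.2.2.insert node ("N" ++ PySem.Int.toStr (s.2.1 + 1))
          else if PySem.Str.startswith node "C" then s.2.2.insert node ("C" ++ PySem.Int.toStr (s.2.1 + 1))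
          else s.2.2)

-- visited sets that can arise: duplicate-free, consisting of keys of graph
def pvGood (graph : List (String × List String)) (v : List String) : Prop :=
  v.Nodup ∧ ∀ x ∈ v, (PySem.Dict.mk graph).contains x = true

-- the number of distinct keys of graph
def pvC (graph : List (String × List String)) : Nat := (graph.map Prod.fst).toFinset.card

lemma pv_contains_mem {graph : List (String × List String)} {x : String}
    (h : (PySem.Dict.mk graph).contains x = true) : x ∈ graph.map Prod.fst := by
  rw [PySem.Dict.contains_eq_decide_mem_keys] at h
  simpa [PySem.Dict.keys_mk] using h

lemma pv_good_length_le {graph : List (String × List String)} {v : List String}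
    (h : pvGood graph v) : v.length ≤ pvC graph := by
  obtain ⟨hnd, hmem⟩ := h
  have hsub : v.toFinset ⊆ (graph.map Prod.fst).toFinset := by
    intro x hx
    simp only [List.mem_toFinset] at hx ⊢
    exact pv_contains_mem (hmem x hx)
  calc v.length = v.toFinset.card := (List.toFinset_card_of_nodup hnd).symm
    _ ≤ _ := Finset.card_le_card hsub

lemma pv_C_le {graph : List (String × List String)} : pvC graph ≤ graph.length := by
  calc pvC graph ≤ (graph.map Prod.fst).length := List.toFinset_card_le _
    _ = graph.length := List.length_map ..

lemma pv_set_contains_iff (s : PySem.Set String) (x : String) :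
    PySem.Set.contains s x = true ↔ x ∈ s := by
  simp [PySem.Set.contains]

lemma pv_length_add {v : List String} {n : String} (hnv : n ∉ v) :
    (PySem.Set.add v n).length = v.length + 1 := by
  simp only [PySem.Set.add]
  split
  · exact absurd (by simpa using ‹v.contains n = true›) hnv
  · simp

lemma pv_good_add {graph : List (String × List String)} {v : List String} {n : String}
    (h : pvGood graph v) (hn : (PySem.Dict.mk graph).contains n = true)
    (hnv : n ∉ v) : pvGood graph (PySem.Set.add v n) := by
  obtain ⟨hnd, hmem⟩ := h
  constructor
  · simp only [PySem.Set.add]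
    split
    · exact hnd
    · simp only [List.nodup_append, List.nodup_singleton, true_and]
      refine ⟨hnd, ?_⟩
      intro a ha b hb
      simp only [List.mem_singleton] at hb
      subst hb
      exact fun h' => hnv (h' ▸ ha)
  · intro x hx
    rcases (PySem.Set.mem_add v n x).1 hx with hx | rfl
    · exact hmem x hx
    · exact hn

lemma pv_good_lt {graph : List (String × List String)} {v : List String} {n : String}
    (h : pvGood graph v) (hn : (PySem.Dict.mk graph).contains n = true)
    (hnv : n ∉ v) : v.length < pvC graph := by
  have h' := pv_good_length_le (pv_good_add h hn hnv)
  rw [pv_length_add hnv] at h'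
  omega

lemma pv_nbrs_eq (graph : List (String × List String)) (n : String) :
    pvNbrsA graph n = pvNbrsB graph n := rfl

lemma pv_nbrs_contains {graph : List (String × List String)} {n nb : String}
    (h : nb ∈ pvNbrsB graph n) : (PySem.Dict.mk graph).contains nb = true := by
  unfold pvNbrsB at h
  rcases hg : (PySem.Dict.mk graph).get? n with _ | ns <;> rw [hg] at h
  · simp at h
  · exact (List.mem_filter.1 h).2

-- membership in B's iteration order is membership in the neighbor list
lemma pv_ord_mem {c : Bool} {l : List String} {x : String}
    (h : x ∈ (if c then l else l.reverse)) : x ∈ l := by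
  rcases c with _ | _
  · simpa using List.mem_reverse.1 (by simpa using h)
  · simpa using h

lemma pv_ord_contains {graph : List (String × List String)} {direction : String} {n x : String}
    (h : x ∈ (if direction == "forward" then pvNbrsB graph n else (pvNbrsB graph n).reverse)) :
    (PySem.Dict.mk graph).contains x = true :=
  pv_nbrs_contains (pv_ord_mem h)

-- the push loop of A appends exactly the not-yet-visited neighbors, reversed, on top
lemma pv_push_eq (p : String → Bool) (l rest : List String) :
    l.foldl (fun st nb => if p nb then st else nb :: st) rest
      = (l.filter (fun nb => !p nb)).reverse ++ rest := by
  induction l generalizing rest with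
  | nil => simp
  | cons x xs ih =>
    by_cases hx : p x = true <;> simp [List.foldl_cons, hx, ih]

-- skipping a visited node is a no-op for the bridge dfs
lemma pv_dfsB_skip {graph : List (String × List String)} {direction : String} {f : Nat}
    {s : PySem.Set String × Int × PySem.Dict String String} {n : String}
    (h : n ∈ s.1) : pvDfsAB graph direction f s n = s := by
  rcases f with _ | f
  · rfl
  · simp only [pvDfsAB, (pv_set_contains_iff s.1 n).2 h, if_true]

-- monotonicity / invariant preservation of the bridge dfs (single-call form)
lemma pv_dfsB_mono {graph : List (String × List String)} {direction : String} : ∀ (f : Nat)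
    (s : PySem.Set String × Int × PySem.Dict String String) (n : String),
    pvGood graph s.1 → (PySem.Dict.mk graph).contains n = true →
    pvGood graph (pvDfsAB graph direction f s n).1 ∧
      (∀ x ∈ s.1, x ∈ (pvDfsAB graph direction f s n).1) ∧
      s.1.length ≤ (pvDfsAB graph direction f s n).1.length := by
  intro f
  induction f with
  | zero => intro s n hg _; exact ⟨hg, fun x hx => hx, le_refl _⟩
  | succ f ih =>
    have ihL : ∀ (l : List String) (s : PySem.Set String × Int × PySem.Dict String String),
        pvGood graph s.1 → (∀ x ∈ l, (PySem.Dict.mk graph).contains x = true) →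
        pvGood graph (l.foldl (fun st nb => pvDfsAB graph direction f st nb) s).1 ∧
          (∀ x ∈ s.1, x ∈ (l.foldl (fun st nb => pvDfsAB graph direction f st nb) s).1) ∧
          s.1.length ≤ (l.foldl (fun st nb => pvDfsAB graph direction f st nb) s).1.length := by
      intro l
      induction l with
      | nil => intro s hg _; exact ⟨hg, fun x hx => hx, le_refl _⟩
      | cons y ys ihys =>
        intro s hg hl
        obtain ⟨hg1, hsub1, hlen1⟩ := ih s y hg (hl y (by simp))
        obtain ⟨hg2, hsub2, hlen2⟩ := ihys (pvDfsAB graph direction f s y) hg1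
          (fun x hx => hl x (by simp [hx]))
        exact ⟨hg2, fun x hx => hsub2 x (hsub1 x hx), le_trans hlen1 hlen2⟩
    intro s n hg hn
    by_cases hv : PySem.Set.contains s.1 n = true
    · simp only [pvDfsAB, hv, if_true]
      exact ⟨hg, fun x hx => hx, le_refl _⟩
    · have hnv : n ∉ s.1 := fun h => hv ((pv_set_contains_iff s.1 n).2 h)
      simp only [pvDfsAB, hv, Bool.false_eq_true, if_false]
      obtain ⟨hg2, hsub2, hlen2⟩ := ihL
        (if direction == "forward" then pvNbrsB graph n else (pvNbrsB graph n).reverse)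
        (PySem.Set.add s.1 n, s.2.1 + 1, _)
        (pv_good_add hg hn hnv) (fun x hx => pv_ord_contains hx)
      refine ⟨hg2, fun x hx => hsub2 x ((PySem.Set.mem_add s.1 n x).2 (Or.inl hx)), ?_⟩
      have := pv_length_add hnv
      simp only at hlen2
      omega

-- fuel irrelevance: any fuel ≥ (#distinct keys − #visited) gives the same result
lemma pv_dfsB_fuel {graph : List (String × List String)} {direction : String} : ∀ (f1 f2 : Nat)
    (s : PySem.Set String × Int × PySem.Dict String String) (n : String),
    pvGood graph s.1 → (PySem.Dict.mk graph).contains n = true →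
    pvC graph ≤ f1 + s.1.length → pvC graph ≤ f2 + s.1.length →
    pvDfsAB graph direction f1 s n = pvDfsAB graph direction f2 s n := by
  intro f1
  induction f1 with
  | zero =>
    intro f2 s n hg hn h1 _
    by_cases hnv : n ∈ s.1
    · rw [pv_dfsB_skip hnv, pv_dfsB_skip hnv]
    · exact absurd (pv_good_lt hg hn hnv) (by omega)
  | succ f ihf =>
    intro f2 s n hg hn h1 h2
    by_cases hnv : n ∈ s.1
    · rw [pv_dfsB_skip hnv, pv_dfsB_skip hnv]
    · have hlt : s.1.length < pvC graph := pv_good_lt hg hn hnv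
      obtain ⟨g, rfl⟩ : ∃ g, f2 = g + 1 := ⟨f2 - 1, by omega⟩
      have hnc : ¬ PySem.Set.contains s.1 n = true :=
        fun h => hnv ((pv_set_contains_iff s.1 n).1 h)
      simp only [pvDfsAB, hnc, Bool.false_eq_true, if_false]
      have hadd := pv_length_add hnv
      have hg' : pvGood graph (PySem.Set.add s.1 n) := pv_good_add hg hn hnv
      have hfold : ∀ (l : List String)
          (t : PySem.Set String × Int × PySem.Dict String String),
          pvGood graph t.1 → (∀ x ∈ l, (PySem.Dict.mk graph).contains x = true) →
          pvC graph ≤ f + t.1.length → pvC graph ≤ g + t.1.length →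
          l.foldl (fun st nb => pvDfsAB graph direction f st nb) t
            = l.foldl (fun st nb => pvDfsAB graph direction g st nb) t := by
        intro l
        induction l with
        | nil => intro t _ _ _ _; rfl
        | cons y ys ihys =>
          intro t hgt hl hf hgg
          have hy := hl y (by simp)
          have heq : pvDfsAB graph direction f t y = pvDfsAB graph direction g t y :=
            ihf g t y hgt hy hf hgg
          obtain ⟨hg2, _, hlen2⟩ := pv_dfsB_mono (direction := direction) f t y hgt hy
          simp only [List.foldl_cons, heq]
          rw [← heq]
          exact ihys (pvDfsAB graph direction f t y) hg2
            (fun x hx => hl x (by simp [hx])) (by omega) (by omega)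
      exact hfold _ (PySem.Set.add s.1 n, s.2.1 + 1, _) hg'
        (fun x hx => pv_ord_contains hx) (by simp only; omega) (by simp only; omega)

-- the fold form of fuel irrelevance
lemma pv_dfsB_fuel_fold {graph : List (String × List String)} {direction : String}
    (f1 f2 : Nat) (l : List String)
    (s : PySem.Set String × Int × PySem.Dict String String)
    (hg : pvGood graph s.1) (hl : ∀ x ∈ l, (PySem.Dict.mk graph).contains x = true)
    (h1 : pvC graph ≤ f1 + s.1.length) (h2 : pvC graph ≤ f2 + s.1.length) :
    l.foldl (fun st nb => pvDfsAB graph direction f1 st nb) s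
      = l.foldl (fun st nb => pvDfsAB graph direction f2 st nb) s := by
  induction l generalizing s with
  | nil => rfl
  | cons y ys ih =>
    have hy := hl y (by simp)
    have heq := pv_dfsB_fuel (direction := direction) f1 f2 s y hg hy h1 h2
    obtain ⟨hg2, _, hlen2⟩ := pv_dfsB_mono (direction := direction) f1 s y hg hy
    simp only [List.foldl_cons, heq]
    rw [← heq]
    exact ih (pvDfsAB graph direction f1 s y) hg2 (fun x hx => hl x (by simp [hx]))
      (by omega) (by omega)

-- the fold form of monotonicity
lemma pv_dfsB_mono_fold {graph : List (String × List String)} {direction : String}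
    (f : Nat) (l : List String)
    (s : PySem.Set String × Int × PySem.Dict String String)
    (hg : pvGood graph s.1) (hl : ∀ x ∈ l, (PySem.Dict.mk graph).contains x = true) :
    pvGood graph (l.foldl (fun st nb => pvDfsAB graph direction f st nb) s).1 ∧
      (∀ x ∈ s.1, x ∈ (l.foldl (fun st nb => pvDfsAB graph direction f st nb) s).1) ∧
      s.1.length ≤ (l.foldl (fun st nb => pvDfsAB graph direction f st nb) s).1.length := by
  induction l generalizing s with
  | nil => exact ⟨hg, fun x hx => hx, le_refl _⟩
  | cons y ys ih =>
    obtain ⟨hg1, hsub1, hlen1⟩ := pv_dfsB_mono (direction := direction) f s y hg (hl y (by simp))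
    obtain ⟨hg2, hsub2, hlen2⟩ := ih (pvDfsAB graph direction f s y) hg1 (fun x hx => hl x (by simp [hx]))
    exact ⟨hg2, fun x hx => hsub2 x (hsub1 x hx), le_trans hlen1 hlen2⟩

-- entries already visited may be dropped from a worklist
lemma pv_dfsB_filter {graph : List (String × List String)} {direction : String} (f : Nat)
    (l : List String) (p : String → Bool)
    (s : PySem.Set String × Int × PySem.Dict String String)
    (hg : pvGood graph s.1) (hl : ∀ x ∈ l, (PySem.Dict.mk graph).contains x = true)
    (hp : ∀ x ∈ l, p x = false → x ∈ s.1) :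
    (l.filter p).foldl (fun st nb => pvDfsAB graph direction f st nb) s
      = l.foldl (fun st nb => pvDfsAB graph direction f st nb) s := by
  induction l generalizing s with
  | nil => rfl
  | cons y ys ih =>
    by_cases hy : p y = true
    · obtain ⟨hg2, hsub2, _⟩ := pv_dfsB_mono (direction := direction) f s y hg (hl y (by simp))
      simp only [List.filter_cons, hy, if_true, List.foldl_cons]
      exact ih (pvDfsAB graph direction f s y) hg2 (fun x hx => hl x (by simp [hx]))
        (fun x hx hpx => hsub2 x (hp x (by simp [hx]) hpx))
    · have hyv : y ∈ s.1 := hp y (by simp) (by simpa using hy)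
      simp only [List.filter_cons, hy, List.foldl_cons, pv_dfsB_skip hyv]
      exact ih s hg (fun x hx => hl x (by simp [hx])) (fun x hx => hp x (by simp [hx]))

-- STEP 1: A's stack loop equals folding the bridge dfs over the stack (top-first)
lemma pv_main {graph : List (String × List String)} {direction : String} : ∀ (fa fb : Nat)
    (v : PySem.Set String) (stack : List String) (i : Int) (m : PySem.Dict String String),
    pvGood graph v → (∀ x ∈ stack, (PySem.Dict.mk graph).contains x = true) →
    pvC graph ≤ fa + v.length → pvC graph ≤ fb + v.length →
    pvLoopA graph direction fa v stack i m
      = (stack.foldl (fun st nb => pvDfsAB graph direction fb st nb) (v, i, m)).2.2 := by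
  intro fa
  induction fa with
  | zero =>
    -- all distinct keys are visited: every stack entry is skipped on both sides
    intro fb v stack i m hg hs h1 _
    induction stack with
    | nil => rw [pvLoopA]; rfl
    | cons n rest ihr =>
      have hn := hs n (by simp)
      have hnv : n ∈ v := by
        by_contra hnv
        exact absurd (pv_good_lt hg hn hnv) (by omega)
      rw [pvLoopA]
      simp only [(pv_set_contains_iff v n).2 hnv, if_true, List.foldl_cons,
        pv_dfsB_skip (s := (v, i, m)) (f := fb) hnv]
      exact ihr (fun x hx => hs x (by simp [hx]))
  | succ fa iha =>
    intro fb v stack i m hg hs h1 h2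
    induction stack with
    | nil => rw [pvLoopA]; rfl
    | cons n rest ihr =>
      have hn := hs n (by simp)
      have hrest : ∀ x ∈ rest, (PySem.Dict.mk graph).contains x = true :=
        fun x hx => hs x (by simp [hx])
      by_cases hnv : n ∈ v
      · rw [pvLoopA]
        simp only [(pv_set_contains_iff v n).2 hnv, if_true, List.foldl_cons,
          pv_dfsB_skip (s := (v, i, m)) (f := fb) hnv]
        exact ihr hrest
      · have hnc : ¬ PySem.Set.contains v n = true :=
          fun h => hnv ((pv_set_contains_iff v n).1 h)
        have hlt : v.length < pvC graph := pv_good_lt hg hn hnv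
        obtain ⟨b, rfl⟩ : ∃ b, fb = b + 1 := ⟨fb - 1, by omega⟩
        have hadd := pv_length_add hnv
        have hg' : pvGood graph (PySem.Set.add v n) := pv_good_add hg hn hnv
        -- A's new stack = unvisited part of B's iteration order, on top of rest
        have hstack' :
            ((if direction == "forward" then (pvNbrsA graph n).reverse else pvNbrsA graph n).foldl
              (fun st nb => if PySem.Set.contains (PySem.Set.add v n) nb then st else nb :: st) rest)
            = (if direction == "forward" then pvNbrsB graph n else (pvNbrsB graph n).reverse).filter
                (fun nb => !PySem.Set.contains (PySem.Set.add v n) nb) ++ rest := by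
          rw [pv_push_eq]
          rcases hd : (direction == "forward") with _ | _
          · simp [pv_nbrs_eq, List.filter_reverse]
          · simp [pv_nbrs_eq, List.filter_reverse]
        rw [pvLoopA]
        simp only [hnc, Bool.false_eq_true, if_false, hstack']
        -- outer IH at fuels (fa, b) on the extended stack
        rw [iha b (PySem.Set.add v n) _ (i + 1) _ hg'
          (by
            intro x hx
            rcases List.mem_append.1 hx with hx | hx
            · exact pv_ord_contains (List.mem_of_mem_filter hx)
            · exact hrest x hx)
          (by omega) (by omega)]
        -- bridge side: unfold the head call into a fold over the full order list
        conv_rhs => rw [List.foldl_cons]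
        conv_rhs => rw [pvDfsAB]
        simp only [hnc, Bool.false_eq_true, if_false]
        rw [List.foldl_append]
        rw [pv_dfsB_filter (direction := direction) b _
          (fun nb => !PySem.Set.contains (PySem.Set.add v n) nb)
          (PySem.Set.add v n, i + 1, _) hg' (fun x hx => pv_ord_contains hx)
          (by
            intro x hx hpx
            have hb : (PySem.Set.add v n).contains x = true := by
              cases hcb : (PySem.Set.add v n).contains x
              · exfalso
                simp only [Bool.not_eq_false'] at hpx
                rw [hpx] at hcb
                simp at hcb
              · rfl
            exact (pv_set_contains_iff _ x).1 hb)]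
        -- remaining fuel mismatch on rest: b vs b+1, both sufficient once n is visited
        obtain ⟨hgS, _, hlenS⟩ := pv_dfsB_mono_fold (direction := direction) b
          (if direction == "forward" then pvNbrsB graph n else (pvNbrsB graph n).reverse)
          (PySem.Set.add v n, i + 1, _) hg' (fun x hx => pv_ord_contains hx)
        rw [pv_dfsB_fuel_fold (direction := direction) b (b + 1) rest _ hgS hrest
          (by simp only at hlenS ⊢; omega) (by simp only at hlenS ⊢; omega)]

-- the name entries B's pass 2 appends for visit order l starting at index k
def pvNames : Int → List String → List (String × String)
  | _, [] => []
  | k, node :: rest =>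
    (if PySem.Str.startswith node "N" then [(node, "N" ++ PySem.Int.toStr k)]
     else if PySem.Str.startswith node "C" then [(node, "C" ++ PySem.Int.toStr k)]
     else []) ++ pvNames (k + 1) rest

lemma pvNames_append (a b : List String) : ∀ k : Int,
    pvNames k (a ++ b) = pvNames k a ++ pvNames (k + a.length) b := by
  induction a with
  | nil => intro k; simp [pvNames]
  | cons x xs ih =>
    intro k
    have h2 : k + ((x :: xs).length : Int) = k + 1 + (xs.length : Int) := by
      simp only [List.length_cons]
      push_cast
      ring
    simp only [List.cons_append, pvNames, ih (k + 1), List.append_assoc, h2]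

-- STEP 2: the bridge dfs is B's pass 1 (order list) plus the pvNames entries
lemma pv_couple {graph : List (String × List String)} {direction : String} : ∀ (f : Nat)
    (s : PySem.Set String × Int × PySem.Dict String String) (ord : List String) (n : String),
    pvGood graph s.1 → (PySem.Dict.mk graph).contains n = true →
    (∀ k ∈ s.2.2.keys, k ∈ s.1) →
    ∃ δ : List String,
      pvVisitB graph direction f (s.1, ord) n = ((pvDfsAB graph direction f s n).1, ord ++ δ)
      ∧ (pvDfsAB graph direction f s n).2.1 = s.2.1 + δ.length
      ∧ ((pvDfsAB graph direction f s n).2.2).items = s.2.2.items ++ pvNames (s.2.1 + 1) δ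
      ∧ (∀ k ∈ ((pvDfsAB graph direction f s n).2.2).keys, k ∈ (pvDfsAB graph direction f s n).1)
      ∧ (∀ x ∈ δ, x ∈ (pvDfsAB graph direction f s n).1 ∧ x ∉ s.1)
      ∧ δ.Nodup := by
  intro f
  induction f with
  | zero =>
    intro s ord n _hg _hn hkeys
    exact ⟨[], by simp [pvVisitB, pvDfsAB], by simp [pvDfsAB], by simp [pvDfsAB, pvNames],
      by simpa [pvDfsAB] using hkeys, by simp, List.nodup_nil⟩
  | succ f ih =>
    have ihL : ∀ (l : List String) (s : PySem.Set String × Int × PySem.Dict String String)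
        (ord : List String),
        pvGood graph s.1 → (∀ x ∈ l, (PySem.Dict.mk graph).contains x = true) →
        (∀ k ∈ s.2.2.keys, k ∈ s.1) →
        ∃ δ : List String,
          l.foldl (fun st nb => pvVisitB graph direction f st nb) (s.1, ord)
            = ((l.foldl (fun st nb => pvDfsAB graph direction f st nb) s).1, ord ++ δ)
          ∧ (l.foldl (fun st nb => pvDfsAB graph direction f st nb) s).2.1 = s.2.1 + δ.length
          ∧ ((l.foldl (fun st nb => pvDfsAB graph direction f st nb) s).2.2).items
              = s.2.2.items ++ pvNames (s.2.1 + 1) δ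
          ∧ (∀ k ∈ ((l.foldl (fun st nb => pvDfsAB graph direction f st nb) s).2.2).keys,
              k ∈ (l.foldl (fun st nb => pvDfsAB graph direction f st nb) s).1)
          ∧ (∀ x ∈ δ, x ∈ (l.foldl (fun st nb => pvDfsAB graph direction f st nb) s).1 ∧ x ∉ s.1)
          ∧ δ.Nodup := by
      intro l
      induction l with
      | nil =>
        intro s ord _hg _hl hkeys
        exact ⟨[], by simp, by simp, by simp [pvNames], hkeys, by simp, List.nodup_nil⟩
      | cons y ys ihys =>
        intro s ord hg hl hkeys
        have hy := hl y (by simp)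
        obtain ⟨δ1, he1, hi1, hm1, hk1, hf1, hnd1⟩ := ih s ord y hg hy hkeys
        obtain ⟨hg1, hsub1, _⟩ := pv_dfsB_mono (direction := direction) f s y hg hy
        obtain ⟨δ2, he2, hi2, hm2, hk2, hf2, hnd2⟩ :=
          ihys (pvDfsAB graph direction f s y) (ord ++ δ1) hg1
            (fun x hx => hl x (by simp [hx])) hk1
        obtain ⟨_, hsubF, _⟩ := pv_dfsB_mono_fold (direction := direction) f ys
          (pvDfsAB graph direction f s y) hg1 (fun x hx => hl x (by simp [hx]))
        refine ⟨δ1 ++ δ2, ?_, ?_, ?_, hk2, ?_, ?_⟩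
        · simp only [List.foldl_cons, he1, he2, List.append_assoc]
        · simp only [List.foldl_cons, hi2, hi1, List.length_append]
          push_cast
          ring
        · have harg : (pvDfsAB graph direction f s y).2.1 + 1
              = s.2.1 + 1 + (δ1.length : Int) := by rw [hi1]; ring
          simp only [List.foldl_cons, hm2, harg, hm1, pvNames_append δ1 δ2 (s.2.1 + 1),
            List.append_assoc]
        · intro x hx
          rcases List.mem_append.1 hx with hx | hx
          · obtain ⟨hx1, hx2⟩ := hf1 x hx
            exact ⟨by simpa only [List.foldl_cons] using hsubF x hx1, hx2⟩
          · obtain ⟨hx1, hx2⟩ := hf2 x hx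
            exact ⟨by simpa only [List.foldl_cons] using hx1,
              fun hmem => hx2 (hsub1 x hmem)⟩
        · rw [List.nodup_append]
          refine ⟨hnd1, hnd2, ?_⟩
          intro a ha b hb
          rintro rfl
          exact (hf2 a hb).2 ((hf1 a ha).1)
    intro s ord n hg hn hkeys
    by_cases hv : PySem.Set.contains s.1 n = true
    · have hnv : n ∈ s.1 := (pv_set_contains_iff s.1 n).1 hv
      refine ⟨[], ?_, ?_, ?_, ?_, by simp, List.nodup_nil⟩
      · simp only [pvVisitB, hv, if_true, pv_dfsB_skip (f := f + 1) hnv, List.append_nil]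
      · simp [pv_dfsB_skip (f := f + 1) hnv]
      · simp [pv_dfsB_skip (f := f + 1) hnv, pvNames]
      · simpa [pv_dfsB_skip (f := f + 1) hnv] using hkeys
    · have hnv : n ∉ s.1 := fun h => hv ((pv_set_contains_iff s.1 n).2 h)
      have hg' : pvGood graph (PySem.Set.add s.1 n) := pv_good_add hg hn hnv
      -- the dict never holds n yet, so the maybe-insert appends
      have hmc : s.2.2.contains n = false := by
        cases hcb : s.2.2.contains n
        · rfl
        · exact absurd (hkeys n ((PySem.Dict.contains_iff_mem_keys _ _).1 hcb)) hnv
      have hitems :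
          (if PySem.Str.startswith n "N" then s.2.2.insert n ("N" ++ PySem.Int.toStr (s.2.1 + 1))
           else if PySem.Str.startswith n "C" then s.2.2.insert n ("C" ++ PySem.Int.toStr (s.2.1 + 1))
           else s.2.2).items
            = s.2.2.items ++
              (if PySem.Str.startswith n "N" then [(n, "N" ++ PySem.Int.toStr (s.2.1 + 1))]
               else if PySem.Str.startswith n "C" then [(n, "C" ++ PySem.Int.toStr (s.2.1 + 1))]
               else []) := by
        split_ifs <;>
          simp [PySem.Dict.items_insert_of_not_contains _ _ hmc]
      have hkeys' : ∀ k ∈ (if PySem.Str.startswith n "N" then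
            s.2.2.insert n ("N" ++ PySem.Int.toStr (s.2.1 + 1))
          else if PySem.Str.startswith n "C" then
            s.2.2.insert n ("C" ++ PySem.Int.toStr (s.2.1 + 1))
          else s.2.2).keys, k ∈ PySem.Set.add s.1 n := by
        intro k hk
        have hk' : k = n ∨ k ∈ s.2.2.keys := by
          split_ifs at hk with h1 h2
          · exact (PySem.Dict.mem_keys_insert _ _ _ _).1 hk
          · exact (PySem.Dict.mem_keys_insert _ _ _ _).1 hk
          · exact Or.inr hk
        rcases hk' with rfl | hk'
        · exact (PySem.Set.mem_add s.1 k k).2 (Or.inr rfl)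
        · exact (PySem.Set.mem_add s.1 n k).2 (Or.inl (hkeys k hk'))
      obtain ⟨δ1, he1, hi1, hm1, hk1, hf1, hnd1⟩ :=
        ihL (if direction == "forward" then pvNbrsB graph n else (pvNbrsB graph n).reverse)
          (PySem.Set.add s.1 n, s.2.1 + 1,
            if PySem.Str.startswith n "N" then s.2.2.insert n ("N" ++ PySem.Int.toStr (s.2.1 + 1))
            else if PySem.Str.startswith n "C" then s.2.2.insert n ("C" ++ PySem.Int.toStr (s.2.1 + 1))
            else s.2.2) (ord ++ [n]) hg'
          (fun x hx => pv_ord_contains hx) hkeys'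
      refine ⟨n :: δ1, ?_, ?_, ?_, ?_, ?_, ?_⟩
      · rw [pvVisitB, pvDfsAB]
        simp only [hv, Bool.false_eq_true, if_false]
        simpa only [List.append_assoc, List.singleton_append] using he1
      · rw [pvDfsAB]
        simp only [hv, Bool.false_eq_true, if_false]
        simp only at hi1
        rw [hi1]
        simp only [List.length_cons]
        push_cast
        ring
      · rw [pvDfsAB]
        simp only [hv, Bool.false_eq_true, if_false]
        simp only at hm1
        rw [hm1, hitems, pvNames, List.append_assoc]
      · rw [pvDfsAB]
        simp only [hv, Bool.false_eq_true, if_false]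
        exact hk1
      · rw [pvDfsAB]
        simp only [hv, Bool.false_eq_true, if_false]
        intro x hx
        rcases List.mem_cons.1 hx with rfl | hx
        · obtain ⟨_, hsubF, _⟩ := pv_dfsB_mono_fold (direction := direction) f
            (if direction == "forward" then pvNbrsB graph x else (pvNbrsB graph x).reverse)
            (PySem.Set.add s.1 x, s.2.1 + 1, _) hg' (fun z hz => pv_ord_contains hz)
          exact ⟨hsubF x ((PySem.Set.mem_add s.1 x x).2 (Or.inr rfl)), hnv⟩
        · obtain ⟨hx1, hx2⟩ := hf1 x hx
          exact ⟨hx1, fun hmem => hx2 ((PySem.Set.mem_add s.1 n x).2 (Or.inl hmem))⟩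
      · rw [List.nodup_cons]
        exact ⟨fun hmem => (hf1 n hmem).2 ((PySem.Set.mem_add s.1 n n).2 (Or.inr rfl)), hnd1⟩

-- STEP 3: B's pass 2 over a fresh, duplicate-free order list produces the pvNames entries
lemma pv_names_fold : ∀ (l : List String) (i : Int) (d : PySem.Dict String String),
    (∀ x ∈ l, d.contains x = false) → l.Nodup →
    ((l.foldl (fun (s : Int × PySem.Dict String String) node =>
        (s.1 + 1,
          if PySem.Str.startswith node "N" then s.2.insert node ("N" ++ PySem.Int.toStr s.1)
          else if PySem.Str.startswith node "C" then s.2.insert node ("C" ++ PySem.Int.toStr s.1)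
          else s.2)) (i, d)).2).items = d.items ++ pvNames i l := by
  intro l
  induction l with
  | nil => intro i d _ _; simp [pvNames]
  | cons y ys ih =>
    intro i d hc hnd
    have hyc : d.contains y = false := hc y (by simp)
    have hnody : y ∉ ys := (List.nodup_cons.1 hnd).1
    have hc' : ∀ x ∈ ys,
        (if PySem.Str.startswith y "N" then d.insert y ("N" ++ PySem.Int.toStr i)
         else if PySem.Str.startswith y "C" then d.insert y ("C" ++ PySem.Int.toStr i)
         else d).contains x = false := by
      intro x hx
      have hxy : (x == y) = false := by
        simp only [beq_eq_false_iff_ne, ne_eq]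
        rintro rfl
        exact hnody hx
      split_ifs <;> simp [PySem.Dict.contains_insert, hxy, hc x (by simp [hx])]
    have hitems :
        (if PySem.Str.startswith y "N" then d.insert y ("N" ++ PySem.Int.toStr i)
         else if PySem.Str.startswith y "C" then d.insert y ("C" ++ PySem.Int.toStr i)
         else d).items
          = d.items ++
            (if PySem.Str.startswith y "N" then [(y, "N" ++ PySem.Int.toStr i)]
             else if PySem.Str.startswith y "C" then [(y, "C" ++ PySem.Int.toStr i)]
             else []) := by
      split_ifs <;> simp [PySem.Dict.items_insert_of_not_contains _ _ hyc]
    simp only [List.foldl_cons, ih (i + 1) _ hc' (List.nodup_cons.1 hnd).2, hitems,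
      pvNames, List.append_assoc]

-- ===== VERDICT (by name: the statement is the Claim_ definition above) =====
theorem traverse_cycle_py_spec : Claim_equal_traverse_cycle_py := by
  intro graph start_node direction start_index _hdom hpre
  unfold Spec_traverse_cycle_py traverse_cycle_py traverse_cycle_py_alt
  rw [pv_main (graph.length + 1) (graph.length + 1) PySem.Set.empty [start_node]
    (start_index - 1) PySem.Dict.empty
    ⟨List.nodup_nil, by simp [PySem.Set.empty]⟩
    (by intro x hx; simp only [List.mem_singleton] at hx; subst hx; exact hpre)
    (by have := pv_C_le (graph := graph); simp only [PySem.Set.empty, List.length_nil]; omega)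
    (by have := pv_C_le (graph := graph); simp only [PySem.Set.empty, List.length_nil]; omega)]
  obtain ⟨δ, he, _hi, hm, _hk, _hf, hnd⟩ :=
    pv_couple (direction := direction) (graph.length + 1)
      (PySem.Set.empty, start_index - 1, PySem.Dict.empty) [] start_node
      ⟨List.nodup_nil, by simp [PySem.Set.empty]⟩ hpre (by intro k hk; rw [PySem.Dict.keys_empty] at hk; simp at hk)
  simp only [List.foldl_cons, List.foldl_nil]
  simp only [List.nil_append] at he
  have h1 : start_index - 1 + 1 = start_index := by ring
  rw [h1] at hm
  rw [he, hm, pv_names_fold δ start_index PySem.Dict.empty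
    (fun x _ => PySem.Dict.contains_empty _) hnd]
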